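-- pv_equiv track=rewrite | github.com/MrBrantCode/unitest_baseline | mut_generate/mist_train_cf/cf_6368/solution.py | odd_prime_powers
-- ===== SOURCE A (Python) =====
-- def odd_prime_powers(nums):
--     """
--     Returns a new list containing the squares of each odd prime number in the input list.
--
--     Args:
--         nums (list): A list of positive integers.
--
--     Returns:
--         list: A list of squares of odd prime numbers.
--     """
--     def is_prime(n):
--         if n < 2:
--             return False
--         for i in range(2, int(n ** 0.5) + 1):
--             if n % i == 0:
--                 return False
--         return True
--
--     return [i ** 2 for i in nums if is_prime(i) and i % 2 != 0]
-- ===== SOURCE B (Python) =====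
-- def odd_prime_powers(nums):
--     # Sieve small primes up to isqrt(max candidate), then test each candidate
--     # by trial division against that prime list only.
--     candidates = [i for i in nums if i >= 2 and i % 2 != 0]
--     if not candidates:
--         return []
--     m = max(candidates)
--     r = 1
--     while (r + 1) * (r + 1) <= m:
--         r += 1
--     sieve = [True] * (r + 1)
--     sieve[0] = False
--     sieve[1] = False
--     for p in range(2, r + 1):
--         if sieve[p]:
--             for q in range(p * p, r + 1, p):
--                 sieve[q] = False
--     primes = [p for p in range(2, r + 1) if sieve[p]]
--     return [i * i for i in candidates
--             if not any(p * p <= i and i % p == 0 for p in primes)]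
-- ===== Notes on version B (the rewrite author's own statement) =====
-- stated objective: faster
-- what changed: Instead of per-element trial division by every integer up to a float-computed sqrt, B builds the primes up to isqrt(max candidate) once with a sieve of Eratosthenes and tests each odd candidate only against those primes.
import Mathlib
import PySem

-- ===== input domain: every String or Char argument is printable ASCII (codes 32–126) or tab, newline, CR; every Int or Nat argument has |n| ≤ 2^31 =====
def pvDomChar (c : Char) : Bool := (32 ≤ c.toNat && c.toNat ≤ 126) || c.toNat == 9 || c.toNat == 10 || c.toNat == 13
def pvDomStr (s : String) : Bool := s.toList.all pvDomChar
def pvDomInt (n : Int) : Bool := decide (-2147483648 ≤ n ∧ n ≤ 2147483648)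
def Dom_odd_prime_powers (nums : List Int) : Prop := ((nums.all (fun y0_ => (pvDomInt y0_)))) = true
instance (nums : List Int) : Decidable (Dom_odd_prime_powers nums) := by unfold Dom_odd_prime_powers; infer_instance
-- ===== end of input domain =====

-- B replaces per-element trial division over ALL integers up to √i (with a float sqrt)
-- by one Eratosthenes sieve of the primes up to √max(candidates) and trial division by
-- those primes only (objective: faster by a constant factor, exact same results).

-- ===== PORT A =====
-- is_prime: trial division for d in range(2, int(n ** 0.5) + 1).
-- int(n ** 0.5) is ported as Nat.sqrt: exact for 0 ≤ n ≤ 2^31 because the correctly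
-- rounded double sqrt of an exactly representable n < 2^52 floors to the integer sqrt.
def isPrimeA (n : Int) : Bool :=
  if n < 2 then false
  else
    !((PySem.List.pyRange 2 ((Nat.sqrt n.toNat : Int) + 1) 1).any fun d =>
        PySem.Int.mod n d == 0)

def odd_prime_powers (nums : List Int) : List Int :=
  (nums.filter fun i => isPrimeA i && PySem.Int.mod i 2 != 0).map fun i => i ^ 2

-- ===== PORT B =====
-- while (r + 1) * (r + 1) <= m: r += 1
def pvIsqrtLoop (m r : Int) : Int :=
  if (r + 1) * (r + 1) ≤ m then pvIsqrtLoop m (r + 1) else r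
termination_by (m - r).toNat
decreasing_by
  have h2 : r + 1 ≤ (r + 1) * (r + 1) := by nlinarith [mul_self_nonneg (r + 1), mul_self_nonneg r]
  omega

-- for q in range(p*p, lim+1, p): sieve[q] = False   (0 < p is a totality guard; the
-- caller always has p ≥ 2)
def pvMark (lim p q : Nat) (s : List Bool) : List Bool :=
  if _h : 0 < p ∧ q ≤ lim then pvMark lim p (q + p) (s.set q false) else s
termination_by lim + 1 - q

-- for p in range(2, lim+1): if sieve[p]: mark multiples   (started at p = 2)
def pvSieveLoop (lim p : Nat) (s : List Bool) : List Bool :=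
  if _h : p ≤ lim then
    pvSieveLoop lim (p + 1) (if s.getD p false then pvMark lim p (p * p) s else s)
  else s
termination_by lim + 1 - p

-- all sieve indices and primes are nonnegative, so they live in Nat (exact)
def odd_prime_powers_alt (nums : List Int) : List Int :=
  match nums.filter (fun i => 2 ≤ i && PySem.Int.mod i 2 != 0) with
  | [] => []
  | c :: cs =>
    let m := cs.foldl max c                       -- max(candidates)
    let lim := (pvIsqrtLoop m 1).toNat
    let s := pvSieveLoop lim 2 (((List.replicate (lim + 1) true).set 0 false).set 1 false)
    let primes := (List.range' 2 (lim - 1)).filter fun p => s.getD p false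
    ((c :: cs).filter fun i =>
        !(primes.any fun p => ((p : Int) * (p : Int) ≤ i) && PySem.Int.mod i (p : Int) == 0)).map
      fun i => i * i

-- ===== PRECONDITION & SPEC =====
def Spec_odd_prime_powers (nums : List Int) (out : List Int) : Prop := out = odd_prime_powers_alt nums
instance (nums : List Int) (out : List Int) : Decidable (Spec_odd_prime_powers nums out) := by unfold Spec_odd_prime_powers; infer_instance

-- ===== CLAIM (what is proved, stated in full; the proofs are below) =====
def Claim_equal_odd_prime_powers : Prop := ∀ (nums : List Int), Dom_odd_prime_powers nums → Spec_odd_prime_powers nums (odd_prime_powers nums)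

-- ===== LEMMAS AND PROOFS =====

-- A's primality test accepts exactly the (nonnegative) primes
theorem isPrimeA_iff (i : Int) : isPrimeA i = true ↔ 2 ≤ i ∧ Nat.Prime i.toNat := by
  by_cases h : i < 2
  · simp only [isPrimeA, if_pos h]
    constructor
    · intro hf; exact absurd hf (by simp)
    · rintro ⟨h2, -⟩; omega
  · push_neg at h
    have hi : i = (i.toNat : Int) := by omega
    unfold isPrimeA
    rw [if_neg (not_lt.mpr h), Bool.not_eq_true', List.any_eq_false]
    constructor
    · intro hall
      refine ⟨h, Nat.prime_def_le_sqrt.mpr ⟨by omega, fun d hd2 hdle hdvd => ?_⟩⟩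
      have hmem : (d : Int) ∈ PySem.List.pyRange 2 ((Nat.sqrt i.toNat : Int) + 1) 1 := by
        rw [PySem.List.mem_pyRange_one]
        constructor
        · exact_mod_cast hd2
        · have : (d : Int) ≤ (Nat.sqrt i.toNat : Int) := by exact_mod_cast hdle
          omega
      have := hall _ hmem
      simp only [beq_iff_eq] at this
      apply this
      rw [PySem.Int.mod_eq_zero_iff_dvd, hi]
      exact_mod_cast hdvd
    · rintro ⟨-, hp⟩ d hd
      rw [PySem.List.mem_pyRange_one] at hd
      simp only [beq_iff_eq, PySem.Int.mod_eq_zero_iff_dvd]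
      intro hdvd
      have hd0 : 0 ≤ d := by omega
      have hdn : d = (d.toNat : Int) := by omega
      have h1 : d.toNat ∣ i.toNat := by
        rw [hi, hdn] at hdvd; exact_mod_cast hdvd
      have h2 : 2 ≤ d.toNat := by omega
      have h3 : d.toNat ≤ Nat.sqrt i.toNat := by omega
      exact (Nat.prime_def_le_sqrt.mp hp).2 _ h2 h3 h1

-- the while loop computes the integer square root
theorem pvIsqrtLoop_eq (m r : Int) (h1 : 1 ≤ r) (h2 : r * r ≤ m) :
    pvIsqrtLoop m r = (Nat.sqrt m.toNat : Int) := by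
  revert h1 h2
  fun_induction pvIsqrtLoop m r with
  | case1 r hc ih => intro h1 _; exact ih (by omega) hc
  | case2 r hc =>
    intro h1 h2
    have hr0 : 0 ≤ r := by omega
    have h2' : r.toNat * r.toNat ≤ m.toNat := by
      have h0 : (0:Int) ≤ r * r := mul_nonneg hr0 hr0
      have : ((r.toNat : Int)) = r := by omega
      nlinarith [Int.toNat_of_nonneg (le_trans h0 h2)]
    have hc' : m.toNat < (r.toNat + 1) * (r.toNat + 1) := by
      have h0 : ((r.toNat : Int)) = r := by omega
      by_contra hcon
      push_cast at hcon
      apply hc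
      calc (r+1)*(r+1) = ((r.toNat:Int)+1)*((r.toNat:Int)+1) := by rw [h0]
        _ ≤ (m.toNat : Int) := by exact_mod_cast not_lt.mp hcon
        _ ≤ m := by have := mul_nonneg hr0 hr0; omega
    have ha : r.toNat ≤ Nat.sqrt m.toNat := Nat.le_sqrt.mpr h2'
    have hb : Nat.sqrt m.toNat < r.toNat + 1 := Nat.sqrt_lt.mpr hc'
    omega

theorem pvMark_length (lim p q : Nat) (s : List Bool) :
    (pvMark lim p q s).length = s.length := by
  fun_induction pvMark lim p q s with
  | case1 q s h ih => simpa using ih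
  | case2 q s h => rfl

theorem pvMark_getD (lim p q : Nat) (s : List Bool) (hp : 0 < p) (hs : lim < s.length)
    (j : Nat) (hj : j ≤ lim) :
    (pvMark lim p q s).getD j false =
      if q ≤ j ∧ p ∣ (j - q) then false else s.getD j false := by
  revert hs
  fun_induction pvMark lim p q s with
  | case1 q s h ih =>
    intro hs
    rw [ih (by simpa using hs)]
    by_cases hjq : j = q
    · subst hjq
      rw [if_neg (by omega), if_pos ⟨le_refl j, by simp⟩]
      rw [List.getD_eq_getElem?_getD, List.getElem?_set, if_pos rfl, if_pos (by omega)]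
      rfl
    · have hset : (s.set q false).getD j false = s.getD j false := by
        rw [List.getD_eq_getElem?_getD, List.getElem?_set, if_neg (by omega),
          ← List.getD_eq_getElem?_getD]
      rw [hset]
      by_cases hcase : q ≤ j ∧ p ∣ (j - q)
      · have hgt : q < j := by omega
        have hge : p ≤ j - q := Nat.le_of_dvd (by omega) hcase.2
        have hdvd' : p ∣ (j - (q + p)) := by
          have : j - (q + p) = (j - q) - p := by omega
          rw [this]; exact Nat.dvd_sub hcase.2 dvd_rfl
        rw [if_pos ⟨by omega, hdvd'⟩, if_pos hcase]
      · rw [if_neg hcase, if_neg ?_]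
        rintro ⟨hle, hdvd⟩
        apply hcase
        refine ⟨by omega, ?_⟩
        have : j - q = (j - (q + p)) + p := by omega
        rw [this]; exact Nat.dvd_add hdvd dvd_rfl
  | case2 q s h =>
    intro hs
    rw [if_neg (by omega)]

-- "q not yet marked after processing p' = 2 .. p-1"
def GoodAt (k q : Nat) : Prop := 2 ≤ q ∧ ∀ d, 2 ≤ d → d < k → d * d ≤ q → ¬ d ∣ q

theorem goodAt_iff_prime (lim q : Nat) (hq : q ≤ lim) :
    GoodAt (lim + 1) q ↔ Nat.Prime q := by
  constructor
  · rintro ⟨h2, hall⟩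
    refine Nat.prime_def_le_sqrt.mpr ⟨h2, fun d hd2 hdle hdvd => ?_⟩
    have hsq : d * d ≤ q := Nat.le_sqrt.mp hdle
    have hdlt : d < lim + 1 := by nlinarith
    exact hall d hd2 hdlt hsq hdvd
  · intro hp
    refine ⟨hp.two_le, fun d hd2 hdlt hsq hdvd => ?_⟩
    rcases (Nat.Prime.eq_one_or_self_of_dvd hp d hdvd) with h1 | hq'
    · omega
    · subst hq'; nlinarith [hp.two_le]

theorem pvSieveLoop_getD (lim p : Nat) (s : List Bool) (hp2 : 2 ≤ p) (hpl : p ≤ lim + 1)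
    (hl : s.length = lim + 1)
    (hs : ∀ q, q ≤ lim → (s.getD q false = true ↔ GoodAt p q)) :
    ∀ q, q ≤ lim → ((pvSieveLoop lim p s).getD q false = true ↔ GoodAt (lim + 1) q) := by
  revert hp2 hpl hl hs
  fun_induction pvSieveLoop lim p s with
  | case1 p s hle ih =>
    intro hp2 _hpl hl hs
    refine ih (by omega) (by omega) ?_ ?_
    · split
      · rw [pvMark_length]; exact hl
      · exact hl
    · intro q hq
      have hgp := hs p hle
      by_cases hb : s.getD p false = true
      · rw [dif_pos hb, pvMark_getD lim p (p * p) s (by omega) (by omega) q hq]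
        have hgood : GoodAt p p := hgp.mp hb
        have hdd : (p * p ≤ q ∧ p ∣ (q - p * p)) ↔ (p * p ≤ q ∧ p ∣ q) := by
          constructor
          · rintro ⟨h1, h2⟩
            refine ⟨h1, ?_⟩
            have : q = (q - p * p) + p * p := by omega
            rw [this]; exact Nat.dvd_add h2 (Dvd.intro p rfl)
          · rintro ⟨h1, h2⟩
            exact ⟨h1, Nat.dvd_sub h2 (Dvd.intro p rfl)⟩
        split_ifs with hcond
        · simp only [false_iff]
          rintro ⟨hq2, hall⟩
            ;
          rcases hdd.mp hcond with ⟨hsq, hdvd⟩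
          exact hall p hp2 (by omega) hsq hdvd
        · rw [hs q hq]
          constructor
          · rintro ⟨hq2, hall⟩
            refine ⟨hq2, fun d hd2 hdlt hdsq hdvd => ?_⟩
            by_cases hdp : d < p
            · exact hall d hd2 hdp hdsq hdvd
            · have : d = p := by omega
              subst this
              exact hcond (hdd.mpr ⟨hdsq, hdvd⟩)
          · rintro ⟨hq2, hall⟩
            exact ⟨hq2, fun d hd2 hdlt hdsq hdvd => hall d hd2 (by omega) hdsq hdvd⟩
      · rw [dif_neg hb, hs q hq]
        have hbad : ¬ GoodAt p p := fun hg => hb (hgp.mpr hg)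
        unfold GoodAt at hbad
        push_neg at hbad
        obtain ⟨d0, hd02, hd0lt, hd0sq, hd0dvd⟩ := hbad (by omega)
        constructor
        · rintro ⟨hq2, hall⟩
          refine ⟨hq2, fun d hd2 hdlt hdsq hdvd => ?_⟩
          by_cases hdp : d < p
          · exact hall d hd2 hdp hdsq hdvd
          · have hdp' : d = p := by omega
            subst hdp'
            have h1 : d0 ∣ q := dvd_trans hd0dvd hdvd
            have h2 : d0 * d0 ≤ q := by nlinarith
            exact hall d0 hd02 (by omega) h2 h1
        · rintro ⟨hq2, hall⟩
          exact ⟨hq2, fun d hd2 hdlt hdsq hdvd => hall d hd2 (by omega) hdsq hdvd⟩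
  | case2 p s hgt =>
    intro _hp2 hpl _hl hs q hq
    have hp : p = lim + 1 := by omega
    subst hp
    exact hs q hq

theorem sieve_getD_iff (lim : Nat) (hlim : 1 ≤ lim) (q : Nat) (hq : q ≤ lim) :
    ((pvSieveLoop lim 2
        (((List.replicate (lim + 1) true).set 0 false).set 1 false)).getD q false = true
      ↔ Nat.Prime q) := by
  rw [← goodAt_iff_prime lim q hq]
  refine pvSieveLoop_getD lim 2 _ (le_refl 2) (by omega) (by simp) ?_ q hq
  intro q' hq'
  have hbase : (((List.replicate (lim + 1) true).set 0 false).set 1 false).getD q' false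
      = decide (2 ≤ q') := by
    rw [List.getD_eq_getElem?_getD, List.getElem?_set, List.getElem?_set,
      List.getElem?_replicate]
    split_ifs <;> simp_all <;> omega
  rw [hbase]
  constructor
  · intro h
    refine ⟨by simpa using h, fun d hd2 hdlt _ _ => by omega⟩
  · rintro ⟨h2, -⟩
    simpa using h2

-- the trial division by the sieved primes decides primality of any i < (lim+1)^2
theorem anyPrimes_iff (lim : Nat) (primes : List Nat)
    (hmem : ∀ p, p ∈ primes ↔ 2 ≤ p ∧ p ≤ lim ∧ Nat.Prime p)
    (i : Int) (hi : 2 ≤ i) (hlt : i.toNat < (lim + 1) * (lim + 1)) :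
    ((primes.any fun p => ((p : Int) * (p : Int) ≤ i) && PySem.Int.mod i (p : Int) == 0) = true
      ↔ ¬ Nat.Prime i.toNat) := by
  have hi' : i = (i.toNat : Int) := by omega
  rw [List.any_eq_true]
  constructor
  · rintro ⟨p, hpmem, hcond⟩ hprime
    simp only [Bool.and_eq_true, decide_eq_true_eq, beq_iff_eq] at hcond
    obtain ⟨hle, hmod⟩ := hcond
    have hdvd : (p : Int) ∣ i := PySem.Int.mod_eq_zero_iff_dvd i p |>.mp hmod
    obtain ⟨h2p, -, hp⟩ := (hmem p).mp hpmem
    have hdvdn : p ∣ i.toNat := by rw [hi'] at hdvd; exact_mod_cast hdvd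
    have hlen : p * p ≤ i.toNat := by rw [hi'] at hle; exact_mod_cast hle
    rcases Nat.Prime.eq_one_or_self_of_dvd hprime p hdvdn with h1 | hself
    · omega
    · subst hself
      have := hprime.two_le
      nlinarith
  · intro hnp
    have hn2 : 2 ≤ i.toNat := by omega
    have hp : (i.toNat.minFac).Prime := Nat.minFac_prime (by omega)
    have hdvd : i.toNat.minFac ∣ i.toNat := Nat.minFac_dvd _
    have hsq : i.toNat.minFac * i.toNat.minFac ≤ i.toNat := by
      have := Nat.minFac_sq_le_self (by omega) hnp
      nlinarith [this]
    have hplim : i.toNat.minFac ≤ lim := by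
      by_contra hcon
      push_neg at hcon
      have : (lim + 1) * (lim + 1) ≤ i.toNat.minFac * i.toNat.minFac :=
        Nat.mul_le_mul (by omega) (by omega)
      omega
    refine ⟨i.toNat.minFac, (hmem _).mpr ⟨hp.two_le, hplim, hp⟩, ?_⟩
    simp only [Bool.and_eq_true, decide_eq_true_eq, beq_iff_eq]
    constructor
    · rw [hi']; exact_mod_cast hsq
    · rw [PySem.Int.mod_eq_zero_iff_dvd, hi']; exact_mod_cast hdvd

theorem odd_prime_powers_main (nums : List Int) :
    odd_prime_powers nums = odd_prime_powers_alt nums := by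
  unfold odd_prime_powers odd_prime_powers_alt
  cases hc : nums.filter (fun i => 2 ≤ i && PySem.Int.mod i 2 != 0) with
  | nil =>
    have hA : nums.filter (fun i => isPrimeA i && PySem.Int.mod i 2 != 0) = [] := by
      rw [List.filter_eq_nil_iff]
      intro i hi hcontra
      simp only [Bool.and_eq_true] at hcontra
      obtain ⟨hpr, hodd⟩ := hcontra
      have h2 : 2 ≤ i := ((isPrimeA_iff i).mp hpr).1
      have hmem : i ∈ nums.filter (fun i => 2 ≤ i && PySem.Int.mod i 2 != 0) :=
        List.mem_filter.mpr ⟨hi, by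
          simp only [Bool.and_eq_true, decide_eq_true_eq]; exact ⟨h2, hodd⟩⟩
      rw [hc] at hmem
      simp at hmem
    rw [hA]
    rfl
  | cons c cs =>
    have hmemc : ∀ i, i ∈ c :: cs → i ∈ nums ∧ 2 ≤ i ∧ (PySem.Int.mod i 2 != 0) = true := by
      intro i hi
      rw [← hc] at hi
      have h := List.mem_filter.mp hi
      simp only [Bool.and_eq_true, decide_eq_true_eq] at h
      exact ⟨h.1, h.2.1, h.2.2⟩
    have hcm : ∀ i, i ∈ c :: cs → i ≤ cs.foldl max c := by
      intro i hi
      rcases List.mem_cons.mp hi with h | h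
      · subst h; exact (PySem.List.le_foldl_max cs i).1
      · exact (PySem.List.le_foldl_max cs c).2 i h
    have hm2 : 2 ≤ cs.foldl max c :=
      le_trans (hmemc c (by simp)).2.1 (PySem.List.le_foldl_max cs c).1
    have hsq : pvIsqrtLoop (cs.foldl max c) 1 = (Nat.sqrt (cs.foldl max c).toNat : Int) :=
      pvIsqrtLoop_eq _ 1 le_rfl (by omega)
    have hlimeq : (pvIsqrtLoop (cs.foldl max c) 1).toNat = Nat.sqrt (cs.foldl max c).toNat := by
      rw [hsq]; exact Int.toNat_natCast _
    have hL1 : 1 ≤ (pvIsqrtLoop (cs.foldl max c) 1).toNat := by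
      rw [hlimeq]
      have h1 : Nat.sqrt 1 ≤ Nat.sqrt (cs.foldl max c).toNat := Nat.sqrt_le_sqrt (by omega)
      simpa [Nat.sqrt_one] using h1
    have hMlt : (cs.foldl max c).toNat
        < ((pvIsqrtLoop (cs.foldl max c) 1).toNat + 1) * ((pvIsqrtLoop (cs.foldl max c) 1).toNat + 1) := by
      rw [hlimeq]
      exact Nat.lt_succ_sqrt (cs.foldl max c).toNat
    set L := (pvIsqrtLoop (cs.foldl max c) 1).toNat with hLdef
    set sv := pvSieveLoop L 2 (((List.replicate (L + 1) true).set 0 false).set 1 false) with hsv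
    have hprimes : ∀ p : Nat,
        p ∈ (List.range' 2 (L - 1)).filter (fun p => sv.getD p false)
          ↔ 2 ≤ p ∧ p ≤ L ∧ Nat.Prime p := by
      intro p
      rw [List.mem_filter, List.mem_range'_1]
      constructor
      · rintro ⟨⟨h2, hlt⟩, hsd⟩
        have hpL : p ≤ L := by omega
        exact ⟨h2, hpL, (sieve_getD_iff L hL1 p hpL).mp hsd⟩
      · rintro ⟨h2, hpL, hp⟩
        exact ⟨⟨h2, by omega⟩, (sieve_getD_iff L hL1 p hpL).mpr hp⟩
    simp only [hc]
    rw [← hc, List.filter_filter]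
    have hmap : (fun i : Int => i ^ 2) = fun i : Int => i * i := funext fun i => pow_two i
    rw [hmap]
    congr 1
    apply List.filter_congr
    intro i hi
    by_cases h1 : 2 ≤ i ∧ (PySem.Int.mod i 2 != 0) = true
    · obtain ⟨h2i, hodd⟩ := h1
      have hiin : i ∈ c :: cs := by
        rw [← hc]
        exact List.mem_filter.mpr ⟨hi, by
          simp only [Bool.and_eq_true, decide_eq_true_eq]; exact ⟨h2i, hodd⟩⟩
      have hiM : i ≤ cs.foldl max c := hcm i hiin
      have hbound : i.toNat < (L + 1) * (L + 1) := by omega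
      have hany := anyPrimes_iff L _ hprimes i h2i hbound
      by_cases hpr : Nat.Prime i.toNat
      · have l1 : isPrimeA i = true := (isPrimeA_iff i).mpr ⟨h2i, hpr⟩
        have l2 : ((List.range' 2 (L - 1)).filter (fun p => sv.getD p false)).any
            (fun p => ((p : Int) * (p : Int) ≤ i) && PySem.Int.mod i (p : Int) == 0) = false := by
          cases hb : ((List.range' 2 (L - 1)).filter (fun p => sv.getD p false)).any
              (fun p => ((p : Int) * (p : Int) ≤ i) && PySem.Int.mod i (p : Int) == 0)
          · rfl
          · exact absurd (hany.mp hb) (by simpa using hpr)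
        rw [l1, l2, hodd, decide_eq_true h2i]
        rfl
      · have l1 : isPrimeA i = false := by
          cases hb : isPrimeA i
          · rfl
          · exact absurd ((isPrimeA_iff i).mp hb).2 hpr
        have l2 := hany.mpr hpr
        rw [l1, l2]
        rfl
    · have l1 : (isPrimeA i && PySem.Int.mod i 2 != 0) = false := by
        cases hb : isPrimeA i
        · simp
        · have h2i := ((isPrimeA_iff i).mp hb).1
          cases hm : (PySem.Int.mod i 2 != 0)
          · simp [hm]
          · exact absurd ⟨h2i, hm⟩ h1
      have l2 : (decide (2 ≤ i) && (PySem.Int.mod i 2 != 0)) = false := by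
        by_cases h2i : 2 ≤ i
        · cases hm : (PySem.Int.mod i 2 != 0)
          · simp [hm]
          · exact absurd ⟨h2i, hm⟩ h1
        · simp [h2i]
      rw [l1, l2, Bool.and_false]

-- ===== VERDICT (by name: the statement is the Claim_ definition above) =====
theorem odd_prime_powers_spec : Claim_equal_odd_prime_powers := by
  intro nums _
  exact odd_prime_powers_main nums
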